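-- pv_equiv track=rewrite | github.com/nedbat/adventofcode2023 | day12.py | orders
-- ===== SOURCE A (Python) =====
-- def orders(hashes, dots, sofar=""):
--     if hashes == 0 and dots == 0:
--         yield sofar
--     else:
--         if hashes:
--             yield from orders(hashes-1, dots, sofar + "#")
--         if dots:
--             yield from orders(hashes, dots-1, sofar + ".")
-- ===== SOURCE B (Python) =====
-- def orders(hashes, dots, sofar=""):
--     # Place the hashes one at a time: choose how many dots precede the next '#'.
--     for tail in _arrangements(hashes, dots):
--         yield sofar + tail
--
--
-- def _arrangements(hashes, dots):
--     if hashes == 0: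
--         return ["." * dots]
--     out = []
--     for lead in range(dots + 1):
--         prefix = "." * lead + "#"
--         for t in _arrangements(hashes - 1, dots - lead):
--             out.append(prefix + t)
--     return out
-- ===== Notes on version B (the rewrite author's own statement) =====
-- stated objective: alternative
-- what changed: A branches per character ('#' then '.') recursing on both counters with a growing prefix; B recurses only on the number of hashes, looping over how many dots precede the next '#' and assembling each arrangement from run-of-dots blocks, prepending sofar once at the top.
import Mathlib
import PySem

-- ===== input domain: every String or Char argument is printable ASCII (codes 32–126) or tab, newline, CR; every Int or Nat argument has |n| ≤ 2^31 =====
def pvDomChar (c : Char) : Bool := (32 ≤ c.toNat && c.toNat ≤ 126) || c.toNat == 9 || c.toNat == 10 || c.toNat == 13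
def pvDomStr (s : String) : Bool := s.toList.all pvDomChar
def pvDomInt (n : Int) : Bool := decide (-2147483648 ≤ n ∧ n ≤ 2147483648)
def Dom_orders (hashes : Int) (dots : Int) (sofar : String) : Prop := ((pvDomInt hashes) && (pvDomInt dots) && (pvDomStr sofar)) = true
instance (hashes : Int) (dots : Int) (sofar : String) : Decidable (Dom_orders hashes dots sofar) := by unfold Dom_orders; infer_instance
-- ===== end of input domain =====

-- B replaces A's per-character DFS (branching '#'/'.' on both counters) by a recursion on the
-- number of hashes alone, looping over the length of the dot-run before each '#'; same cost,
-- alternative algorithm. Equivalence is proved for hashes, dots ≥ 0 (A recurses forever otherwise).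


-- ===== PORT A =====
-- Strings are handled as List Char (PySem convention); sofar + "#" is cs ++ ['#'].
-- The fuel only makes the recursion total in Lean: inside Pre_ (hashes, dots ≥ 0) the initial
-- fuel (hashes+dots).toNat + 1 always suffices, so the branch structure is exactly A's.
def ordersFuel : Nat → Int → Int → List Char → List (List Char)
  | 0, _, _, _ => []
  | fuel + 1, hashes, dots, sofar =>
      if hashes = 0 ∧ dots = 0 then [sofar]
      else
        (if hashes ≠ 0 then ordersFuel fuel (hashes - 1) dots (sofar ++ ['#']) else []) ++
        (if dots ≠ 0 then ordersFuel fuel hashes (dots - 1) (sofar ++ ['.']) else [])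

def orders (hashes : Int) (dots : Int) (sofar : String) : List String :=
  (ordersFuel ((hashes + dots).toNat + 1) hashes dots sofar.toList).map String.ofList

-- ===== PORT B =====
-- _arrangements: recursion on the hash count; for each lead in range(dots+1) the next block is
-- "."*lead + "#" ("."*n on chars is List.replicate n '.'; n < 0 gives "").  The fuel only makes
-- the recursion total in Lean: hashes.toNat + 1 suffices whenever Source B's recursion terminates.
def arrangementsB : Nat → Int → Int → List (List Char)
  | 0, _, _ => []
  | fuel + 1, hashes, dots =>
      if hashes = 0 then [List.replicate dots.toNat '.']
      else
        (List.range (dots + 1).toNat).flatMap fun (lead : Nat) =>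
          (arrangementsB fuel (hashes - 1) (dots - lead)).map fun t =>
            (List.replicate lead '.' ++ ['#']) ++ t

def orders_alt (hashes : Int) (dots : Int) (sofar : String) : List String :=
  (arrangementsB (hashes.toNat + 1) hashes dots).map fun t => String.ofList (sofar.toList ++ t)

-- ===== PRECONDITION & SPEC =====
-- On negative hashes or dots the Python A recurses without a base case (RecursionError), so
-- exactly those inputs are excluded.
def Pre_orders (hashes : Int) (dots : Int) (sofar : String) : Prop := 0 ≤ hashes ∧ 0 ≤ dots
instance (hashes : Int) (dots : Int) (sofar : String) : Decidable (Pre_orders hashes dots sofar) := by unfold Pre_orders; infer_instance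
def pvWitness_orders : Int × Int × String := (2, 2, "?")

def Spec_orders (hashes : Int) (dots : Int) (sofar : String) (out : List String) : Prop := out = orders_alt hashes dots sofar
instance (hashes : Int) (dots : Int) (sofar : String) (out : List String) : Decidable (Spec_orders hashes dots sofar out) := by unfold Spec_orders; infer_instance

-- ===== CLAIM (what is proved, stated in full; the proofs are below) =====
def Claim_equal_orders : Prop := ∀ (hashes : Int) (dots : Int) (sofar : String), Dom_orders hashes dots sofar → Pre_orders hashes dots sofar → Spec_orders hashes dots sofar (orders hashes dots sofar)

-- ===== LEMMAS AND PROOFS =====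

-- Proof-side view of _arrangements: the same recursion, structurally on the hash count
-- (no fuel), defined only for a nonnegative hash count.
def arrBT : Nat → Int → List (List Char)
  | 0, dots => [List.replicate dots.toNat '.']
  | h + 1, dots =>
      (List.range (dots + 1).toNat).flatMap fun (lead : Nat) =>
        (arrBT h (dots - lead)).map fun t => (List.replicate lead '.' ++ ['#']) ++ t

-- With enough fuel, the port's _arrangements is the structural recursion arrBT.
theorem arrangementsB_eq_arrBT (fuel : Nat) :
    ∀ (h : Nat) (dots : Int), h < fuel → arrangementsB fuel (h : Int) dots = arrBT h dots := by
  induction fuel with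
  | zero => intro h dots hlt; omega
  | succ n ih =>
    intro h dots hlt
    match h with
    | 0 => simp [arrangementsB, arrBT]
    | (H + 1) =>
      rw [arrangementsB, if_neg (by push_cast; omega), arrBT]
      have e : ((H + 1 : Nat) : Int) - 1 = (H : Nat) := by push_cast; ring
      simp only [e]
      congr 1
      funext lead
      rw [ih H (dots - lead) (by omega)]

-- B's recurrences, matching A's two branches.
theorem arrBT_succ_zero (h : Nat) :
    arrBT (h + 1) 0 = (arrBT h 0).map (fun t => '#' :: t) := by
  simp [arrBT, List.range_succ]

theorem arrBT_succ_succ (h D : Nat) :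
    arrBT (h + 1) ((D : Int) + 1) =
      (arrBT h ((D : Int) + 1)).map (fun t => '#' :: t) ++
      (arrBT (h + 1) (D : Int)).map (fun t => '.' :: t) := by
  conv_lhs => rw [arrBT]
  conv_rhs => rw [arrBT]
  rw [show ((D : Int) + 1 + 1).toNat = (D + 1) + 1 by omega,
      show ((D : Int) + 1).toNat = D + 1 by omega,
      List.range_succ_eq_map, List.flatMap_cons, List.flatMap_map, List.map_flatMap]
  congr 1
  simp [Function.comp_def, List.map_map, List.replicate_succ]

-- Loop invariant: with enough fuel, A's DFS from prefix s lists exactly s ++ each of B's arrangements.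
theorem ordersFuel_eq (fuel : Nat) :
    ∀ (h d : Nat) (s : List Char), h + d < fuel →
      ordersFuel fuel (h : Int) (d : Int) s = (arrBT h (d : Int)).map (fun t => s ++ t) := by
  induction fuel with
  | zero => intro h d s hlt; omega
  | succ n ih =>
    intro h d s hlt
    match h, d, hlt with
    | 0, 0, hlt => simp [ordersFuel, arrBT]
    | 0, (D + 1), hlt =>
      have hd1 : ((D + 1 : Nat) : Int) - 1 = (D : Nat) := by push_cast; ring
      have c1 : ¬(((0 : Nat) : Int) = 0 ∧ ((D + 1 : Nat) : Int) = 0) := by push_cast; omega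
      have c2 : ¬(((0 : Nat) : Int) ≠ 0) := by simp
      have c3 : ((D + 1 : Nat) : Int) ≠ 0 := by push_cast; omega
      rw [ordersFuel, if_neg c1, if_neg c2, if_pos c3]
      rw [hd1, ih 0 D (s ++ ['.']) (by omega)]
      simp [arrBT, List.replicate_succ]
    | (H + 1), 0, hlt =>
      have hh1 : ((H + 1 : Nat) : Int) - 1 = (H : Nat) := by push_cast; ring
      have c1 : ¬(((H + 1 : Nat) : Int) = 0 ∧ ((0 : Nat) : Int) = 0) := by push_cast; omega
      have c2 : ((H + 1 : Nat) : Int) ≠ 0 := by push_cast; omega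
      have c3 : ¬(((0 : Nat) : Int) ≠ 0) := by simp
      rw [ordersFuel, if_neg c1, if_pos c2, if_neg c3]
      rw [hh1, ih H 0 (s ++ ['#']) (by omega)]
      have e0 : ((0 : Nat) : Int) = (0 : Int) := rfl
      rw [e0, arrBT_succ_zero]
      simp [List.map_map, Function.comp_def]
    | (H + 1), (D + 1), hlt =>
      have hh1 : ((H + 1 : Nat) : Int) - 1 = (H : Nat) := by push_cast; ring
      have hd1 : ((D + 1 : Nat) : Int) - 1 = (D : Nat) := by push_cast; ring
      have c1 : ¬(((H + 1 : Nat) : Int) = 0 ∧ ((D + 1 : Nat) : Int) = 0) := by push_cast; omega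
      have c2 : ((H + 1 : Nat) : Int) ≠ 0 := by push_cast; omega
      have c3 : ((D + 1 : Nat) : Int) ≠ 0 := by push_cast; omega
      rw [ordersFuel, if_neg c1, if_pos c2, if_pos c3]
      rw [hh1, hd1, ih (H + 1) D (s ++ ['.']) (by omega), ih H (D + 1) (s ++ ['#']) (by omega)]
      have ec : ((D + 1 : Nat) : Int) = (D : Int) + 1 := by push_cast; ring
      rw [ec, arrBT_succ_succ]
      simp [List.map_map, Function.comp_def]

-- ===== VERDICT (by name: the statement is the Claim_ definition above) =====
theorem orders_spec : Claim_equal_orders := by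
  intro hashes dots sofar _ hpre
  obtain ⟨hh, hd⟩ := hpre
  unfold Spec_orders orders orders_alt
  have e1 : hashes = (hashes.toNat : Int) := (Int.toNat_of_nonneg hh).symm
  have e2 : dots = (dots.toNat : Int) := (Int.toNat_of_nonneg hd).symm
  have efuel : (hashes + dots).toNat + 1 = hashes.toNat + dots.toNat + 1 := by omega
  have key := ordersFuel_eq (hashes.toNat + dots.toNat + 1) hashes.toNat dots.toNat sofar.toList (by omega)
  rw [← e1, ← e2] at key
  have keyB := arrangementsB_eq_arrBT (hashes.toNat + 1) hashes.toNat dots (by omega)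
  rw [← e1] at keyB
  rw [efuel, key, ← keyB]
  simp [List.map_map, Function.comp_def]
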